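-- pv_equiv track=rewrite | github.com/hunterhogan/Integrated_code_fire_font | src/Integrated_Code_Fire/stupidStuff/fontIdentifierReport.py | _invertsBestCmap
-- ===== SOURCE A (Python) =====
-- def _invertsBestCmap(bestCmap: dict[int, str] | None) -> dict[str, list[int]]:
-- 	"""I invert a best cmap mapping (unicode -> glyphName) into (glyphName -> sorted list of unicode scalars).
--
-- 	Parameters
-- 	----------
-- 	bestCmap : dict[int, str] | None
-- 		Mapping from Unicode scalar value to glyph name as returned by
-- 		ttFont.getBestCmap(). If None I return an empty dictionary.
--
-- 	Returns
-- 	-------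
-- 	dict[str, list[int]]
-- 		Mapping from glyph name to a sorted list of Unicode scalar integers.
--
-- 	(AI generated docstring)
--
-- 	References
-- 	----------
-- 	[1] fontTools TTFont.getBestCmap: https://fonttools.readthedocs.io/.
-- 	"""
-- 	if bestCmap is None:
-- 		return {}
--
-- 	dictionaryGlyphNameToUnicodeScalarValue: dict[str, list[int]] = {}
-- 	for unicodeScalarValue, glyphName in bestCmap.items():
-- 		dictionaryGlyphNameToUnicodeScalarValue.setdefault(glyphName, []).append(int(unicodeScalarValue))
--
-- 	for glyphName in dictionaryGlyphNameToUnicodeScalarValue: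
-- 		dictionaryGlyphNameToUnicodeScalarValue[glyphName].sort()
--
-- 	return dictionaryGlyphNameToUnicodeScalarValue
-- ===== SOURCE B (Python) =====
-- def _invertsBestCmap(bestCmap: dict[int, str] | None) -> dict[str, list[int]]:
-- 	"""One global sort of the cmap items by scalar, then a single grouping pass: each glyph's list comes out already sorted, so no per-group sort phase is needed."""
-- 	if bestCmap is None:
-- 		return {}
--
-- 	result: dict[str, list[int]] = {glyphName: [] for glyphName in bestCmap.values()}
-- 	for unicodeScalarValue, glyphName in sorted(bestCmap.items(), key=lambda item: item[0]):
-- 		result[glyphName].append(int(unicodeScalarValue))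
-- 	return result
-- ===== Notes on version B (the rewrite author's own statement) =====
-- stated objective: alternative
-- what changed: A groups scalars per glyph and then runs a second loop sorting every glyph's list; B pre-creates the glyph keys, sorts the cmap items once globally by scalar, and does a single grouping append pass, so the per-group sort loop disappears.
import Mathlib
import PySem

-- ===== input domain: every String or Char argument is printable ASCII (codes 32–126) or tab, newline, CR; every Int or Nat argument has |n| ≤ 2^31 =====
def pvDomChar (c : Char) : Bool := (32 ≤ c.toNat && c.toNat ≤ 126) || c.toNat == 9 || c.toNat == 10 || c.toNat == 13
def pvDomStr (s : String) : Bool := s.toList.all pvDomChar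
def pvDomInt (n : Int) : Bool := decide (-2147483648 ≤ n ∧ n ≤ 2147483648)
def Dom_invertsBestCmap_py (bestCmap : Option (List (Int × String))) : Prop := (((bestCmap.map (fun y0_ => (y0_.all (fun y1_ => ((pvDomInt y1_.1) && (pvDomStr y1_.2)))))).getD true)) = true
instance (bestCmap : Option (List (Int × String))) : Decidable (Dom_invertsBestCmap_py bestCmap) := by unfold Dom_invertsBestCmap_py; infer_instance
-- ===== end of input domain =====

-- B replaces A's group-then-sort-each-group structure by one global sort of the items
-- followed by a single grouping pass (objective: alternative, same result).

-- ===== PORT A =====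
-- group in dict-iteration order (setdefault+append = modify with default []), then
-- sort each glyph's list in a second loop over the dict
def invertsBestCmap_py (bestCmap : Option (List (Int × String))) : List (String × List Int) :=
  match bestCmap with
  | none => []
  | some l =>
    let d := (PySem.Dict.ofList l).items.foldl
      (fun acc p => acc.modify p.2 [] (fun v => v ++ [p.1])) PySem.Dict.empty
    d.items.map (fun q => (q.1, PySem.List.sorted q.2 (fun x => x) false))

-- ===== PORT B =====
def invertsBestCmap_py_alt (bestCmap : Option (List (Int × String))) : List (String × List Int) :=
  match bestCmap with
  | none => []
  | some l =>
    let d0 := PySem.Dict.ofList l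
    -- {glyphName: [] for glyphName in bestCmap.values()}
    let init := d0.values.foldl (fun acc g => acc.insert g ([] : List Int)) PySem.Dict.empty
    -- result[glyphName].append(x): the key is always present (it came from values),
    -- so Python never raises here and modify with default [] is exact
    ((PySem.List.sorted d0.items (fun p => p.1) false).foldl
      (fun acc p => acc.modify p.2 [] (fun v => v ++ [p.1])) init).items

-- ===== PRECONDITION & SPEC =====
def Spec_invertsBestCmap_py (bestCmap : Option (List (Int × String))) (out : List (String × List Int)) : Prop := out = invertsBestCmap_py_alt bestCmap
instance (bestCmap : Option (List (Int × String))) (out : List (String × List Int)) : Decidable (Spec_invertsBestCmap_py bestCmap out) := by unfold Spec_invertsBestCmap_py; infer_instance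

-- ===== CLAIM (what is proved, stated in full; the proofs are below) =====
def Claim_equal_invertsBestCmap_py : Prop := ∀ (bestCmap : Option (List (Int × String))), Dom_invertsBestCmap_py bestCmap → Spec_invertsBestCmap_py bestCmap (invertsBestCmap_py bestCmap)

-- ===== LEMMAS AND PROOFS =====

-- per-key content of the append-grouping fold (used for both ports' grouping loops)
lemma getD_foldl_modify_app (l : List (Int × String)) (d : PySem.Dict String (List Int)) (g : String) :
    (l.foldl (fun acc p => acc.modify p.2 [] (fun v => v ++ [p.1])) d).getD g []
      = d.getD g [] ++ (l.filter (fun p => p.2 == g)).map (·.1) := by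
  induction l generalizing d with
  | nil => simp
  | cons p t ih =>
    simp only [List.foldl_cons, ih, List.filter_cons, PySem.Dict.getD_modify]
    by_cases hg : p.2 = g
    · simp [hg]
    · rw [if_neg (Ne.symm hg)]
      simp [hg]

-- the key-initialisation fold only ever stores []
lemma getD_foldl_insert_nil (vs : List String) (d : PySem.Dict String (List Int)) (g : String)
    (h : d.getD g [] = []) :
    (vs.foldl (fun acc g' => acc.insert g' ([] : List Int)) d).getD g [] = [] := by
  induction vs generalizing d with
  | nil => exact h
  | cons x t ih =>
    refine ih _ ?_
    rw [PySem.Dict.getD_insert]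
    split_ifs with hx
    · rfl
    · exact h

-- filtering the globally sorted items to one glyph yields that glyph's sorted scalars
lemma filter_sorted_eq_sorted_filter (items : List (Int × String)) (g : String) :
    ((PySem.List.sorted items (fun p => p.1) false).filter (fun p => p.2 == g)).map (·.1)
      = PySem.List.sorted ((items.filter (fun p => p.2 == g)).map (·.1)) (fun x => x) false := by
  refine (PySem.List.sorted_id_eq_of_perm_of_pairwise _ _ ?_ ?_).symm
  · exact ((PySem.List.sorted_perm items (fun p => p.1) false).filter _).map _
  · rw [List.pairwise_map]
    exact (PySem.List.sorted_pairwise items (fun p => p.1)).filter _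

-- ===== VERDICT (by name: the statement is the Claim_ definition above) =====
theorem invertsBestCmap_py_spec : Claim_equal_invertsBestCmap_py := by
  intro bestCmap _
  unfold Spec_invertsBestCmap_py invertsBestCmap_py invertsBestCmap_py_alt
  cases bestCmap with
  | none => rfl
  | some l =>
    simp only
    set items := (PySem.Dict.ofList l).items with hitems
    set dA := items.foldl (fun acc p => acc.modify p.2 [] (fun v => v ++ [p.1])) PySem.Dict.empty with hdA
    set init := (items.map (·.2)).foldl (fun acc g => acc.insert g ([] : List Int)) PySem.Dict.empty with hinit
    set sItems := PySem.List.sorted items (fun p => p.1) false with hsItems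
    set dB := sItems.foldl (fun acc p => acc.modify p.2 [] (fun v => v ++ [p.1])) init with hdB
    show dA.items.map _ = dB.items
    have hkInit : init.keys = PySem.Set.ofList (items.map (·.2)) := by
      rw [hinit, PySem.Dict.keys_foldl_insert (items.map (·.2)) (fun _ _ => ([] : List Int)) _,
          PySem.Dict.keys_empty, PySem.Set.update_nil_left]
    have hkA : dA.keys = PySem.Set.ofList (items.map (·.2)) := by
      rw [hdA, PySem.Dict.keys_foldl_modify_key items (·.2) [] (fun acc p v => v ++ [p.1]) _,
          PySem.Dict.keys_empty, PySem.Set.update_nil_left]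
    have hkB : dB.keys = PySem.Set.ofList (items.map (·.2)) := by
      rw [hdB, PySem.Dict.keys_foldl_modify_key sItems (·.2) [] (fun acc p v => v ++ [p.1]) _,
          hkInit, PySem.Set.update_eq_append_filter]
      rw [List.filter_eq_nil_iff.mpr, List.append_nil]
      intro y hy
      rcases List.mem_map.mp ((PySem.Set.mem_ofList _ _).mp hy) with ⟨p, hp, hpy⟩
      have hp' : p ∈ items := by
        rw [hsItems] at hp; simpa [PySem.List.mem_sorted] using hp
      simp
      exact ⟨p.1, by rw [← hpy]; simpa using hp'⟩
    have hndA : dA.keys.Nodup := by rw [hkA]; exact PySem.Set.nodup_ofList _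
    have hndB : dB.keys.Nodup := by rw [hkB]; exact PySem.Set.nodup_ofList _
    rw [PySem.Dict.items_eq_map_keys dA hndA [], PySem.Dict.items_eq_map_keys dB hndB [],
        hkA, hkB, List.map_map]
    refine List.map_congr_left ?_
    intro k _
    simp only [Function.comp]
    have hA : dA.getD k [] = (items.filter (fun p => p.2 == k)).map (·.1) := by
      rw [hdA, getD_foldl_modify_app]; simp
    have hB : dB.getD k [] = (sItems.filter (fun p => p.2 == k)).map (·.1) := by
      rw [hdB, getD_foldl_modify_app,
          getD_foldl_insert_nil _ _ _ (PySem.Dict.getD_empty _ _), List.nil_append]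
    rw [hA, hB, hsItems, filter_sorted_eq_sorted_filter]
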